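-- pv_equiv track=rewrite | github.com/VUIIS/dax | dax/processor_graph.py | get_forward_edges
-- ===== SOURCE A (Python) =====
-- def get_forward_edges(nodes_to_src_edges):
--     sink_edges = dict()
--     # calculate a list of nodes to sink edges
--     for k, v in list(nodes_to_src_edges.items()):
--         if k not in sink_edges:
--             sink_edges[k] = []
--         for src in v:
--             if src not in sink_edges:
--                 sink_edges[src] = []
--             sink_edges[src].append(k)
--     for v in sink_edges:
--         sink_edges[v] = sorted(sink_edges[v])
--
--     return sink_edges
-- ===== SOURCE B (Python) =====
-- def get_forward_edges(nodes_to_src_edges):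
--     # pull-style rebuild: fix the node order first, then gather each node's
--     # incoming edges by scanning all items, sorted
--     nodes = []
--     for k, v in nodes_to_src_edges.items():
--         for n in [k] + v:
--             if n not in nodes:
--                 nodes.append(n)
--     return {n: sorted(k for k, v in nodes_to_src_edges.items()
--                       for s in v if s == n)
--             for n in nodes}
-- ===== Notes on version B (the rewrite author's own statement) =====
-- stated objective: alternative
-- what changed: A pushes every edge into a mutable dict in one pass and sorts in place; B first dedups the node order, then builds the result as a dict comprehension that pulls each node's incoming edges by rescanning all items, sorted.
import Mathlib
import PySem

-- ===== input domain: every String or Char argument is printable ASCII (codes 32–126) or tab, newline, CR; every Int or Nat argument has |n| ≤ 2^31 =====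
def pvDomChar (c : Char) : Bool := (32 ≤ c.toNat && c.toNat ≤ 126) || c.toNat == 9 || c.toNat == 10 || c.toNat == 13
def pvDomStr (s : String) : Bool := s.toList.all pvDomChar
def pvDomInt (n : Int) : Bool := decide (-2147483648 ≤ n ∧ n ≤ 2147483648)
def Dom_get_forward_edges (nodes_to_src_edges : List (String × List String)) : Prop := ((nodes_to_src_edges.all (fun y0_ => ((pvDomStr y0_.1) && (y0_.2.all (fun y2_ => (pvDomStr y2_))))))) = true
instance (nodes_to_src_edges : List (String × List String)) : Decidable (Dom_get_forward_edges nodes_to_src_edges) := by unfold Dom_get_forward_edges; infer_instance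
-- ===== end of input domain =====

-- B rebuilds the same mapping pull-style (node order first, then per-node gather) instead of A's
-- push-pass into a mutable dict; equivalent, no speed claim.

-- ===== PORT A =====
-- `if k not in sink_edges: sink_edges[k] = []`
def pvEnsure (d : PySem.Dict String (List String)) (k : String) : PySem.Dict String (List String) :=
  if d.contains k then d else d.insert k []

-- the body of A's outer loop: ensure k, then append k onto sink_edges[src] for each src in v
def pvStepA (d : PySem.Dict String (List String)) (kv : String × List String) :
    PySem.Dict String (List String) :=
  kv.2.foldl (fun d src => (pvEnsure d src).modify src [] (fun l => l ++ [kv.1])) (pvEnsure d kv.1)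

def get_forward_edges (nodes_to_src_edges : List (String × List String)) : List (String × List String) :=
  let sink_edges := nodes_to_src_edges.foldl pvStepA PySem.Dict.empty
  -- for v in sink_edges: sink_edges[v] = sorted(sink_edges[v])
  let sink_edges := sink_edges.keys.foldl
      (fun d v => d.insert v (PySem.List.sorted (d.getD v []) (fun x => x) false)) sink_edges
  sink_edges.items

-- ===== PORT B =====
-- `if n not in nodes: nodes.append(n)`
def pvAddNode (acc : List String) (n : String) : List String :=
  if n ∈ acc then acc else acc ++ [n]

-- `sorted(k for k, v in nodes_to_src_edges.items() for s in v if s == n)`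
def pvIncoming (nodes_to_src_edges : List (String × List String)) (n : String) : List String :=
  PySem.List.sorted (nodes_to_src_edges.flatMap
      (fun kv => (kv.2.filter (fun s => s == n)).map (fun _ => kv.1))) (fun x => x) false

def get_forward_edges_alt (nodes_to_src_edges : List (String × List String)) : List (String × List String) :=
  let nodes := nodes_to_src_edges.foldl
      (fun acc kv => (kv.1 :: kv.2).foldl pvAddNode acc) []
  nodes.map (fun n => (n, pvIncoming nodes_to_src_edges n))

-- ===== PRECONDITION & SPEC =====
def Spec_get_forward_edges (nodes_to_src_edges : List (String × List String)) (out : List (String × List String)) : Prop := out = get_forward_edges_alt nodes_to_src_edges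
instance (nodes_to_src_edges : List (String × List String)) (out : List (String × List String)) : Decidable (Spec_get_forward_edges nodes_to_src_edges out) := by unfold Spec_get_forward_edges; infer_instance

-- ===== CLAIM (what is proved, stated in full; the proofs are below) =====
def Claim_equal_get_forward_edges : Prop := ∀ (nodes_to_src_edges : List (String × List String)), Dom_get_forward_edges nodes_to_src_edges → Spec_get_forward_edges nodes_to_src_edges (get_forward_edges nodes_to_src_edges)

-- ===== LEMMAS AND PROOFS =====

-- the unsorted incoming-edge list of n contributed by the whole input
def pvColl (xs : List (String × List String)) (n : String) : List String :=
  xs.flatMap (fun kv => (kv.2.filter (fun s => s == n)).map (fun _ => kv.1))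

theorem pvEnsure_getD (d : PySem.Dict String (List String)) (s n : String) :
    (pvEnsure d s).getD n [] = d.getD n [] := by
  unfold pvEnsure
  by_cases h : d.contains s = true
  · simp [h]
  · simp only [Bool.not_eq_true] at h
    rw [if_neg (by simp [h])]
    by_cases hn : n = s
    · subst hn
      rw [PySem.Dict.getD_insert_self, PySem.Dict.getD_of_not_contains d [] h]
    · rw [PySem.Dict.getD_insert_of_ne d [] [] hn]

theorem pvEnsure_keys (d : PySem.Dict String (List String)) (s : String) :
    (pvEnsure d s).keys = PySem.Set.add d.keys s := by
  unfold pvEnsure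
  by_cases h : d.contains s = true
  · rw [if_pos h, PySem.Set.add_of_mem ((PySem.Dict.contains_iff_mem_keys d s).mp h)]
  · simp only [Bool.not_eq_true] at h
    rw [if_neg (by simp [h]), PySem.Dict.keys_insert_of_not_contains d [] h,
      PySem.Set.add_of_not_mem (fun hm => by simp [(PySem.Dict.contains_iff_mem_keys d s).mpr hm] at h)]

theorem pvEnsure_contains_self (d : PySem.Dict String (List String)) (s : String) :
    (pvEnsure d s).contains s = true := by
  unfold pvEnsure
  by_cases h : d.contains s = true
  · simp [h]
  · simp only [Bool.not_eq_true] at h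
    rw [if_neg (by simp [h])]
    exact PySem.Dict.contains_insert_self d s []

-- one inner loop of A: values grow by one copy of k per occurrence of n among v
theorem pvInner_getD (k n : String) (v : List String) (d : PySem.Dict String (List String)) :
    (v.foldl (fun d src => (pvEnsure d src).modify src [] (fun l => l ++ [k])) d).getD n []
      = d.getD n [] ++ (v.filter (fun s => s == n)).map (fun _ => k) := by
  induction v generalizing d with
  | nil => simp
  | cons src rest ih =>
    simp only [List.foldl_cons, ih, List.filter_cons]
    by_cases hn : n = src
    · subst hn
      rw [PySem.Dict.getD_modify_self, pvEnsure_getD]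
      simp [List.append_assoc]
    · rw [PySem.Dict.getD_modify_of_ne _ [] _ hn, pvEnsure_getD]
      have : (src == n) = false := by simp [Ne.symm hn]
      simp [this]

theorem pvInner_keys (k : String) (v : List String) (d : PySem.Dict String (List String)) :
    (v.foldl (fun d src => (pvEnsure d src).modify src [] (fun l => l ++ [k])) d).keys
      = PySem.Set.update d.keys v := by
  induction v generalizing d with
  | nil => simp [PySem.Set.update]
  | cons src rest ih =>
    simp only [List.foldl_cons, ih, PySem.Set.update_cons]
    congr 1
    rw [PySem.Dict.keys_modify, PySem.Dict.keys_insert_of_contains _ _ (pvEnsure_contains_self d src),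
      pvEnsure_keys]

theorem pvStepA_getD (kv : String × List String) (d : PySem.Dict String (List String)) (n : String) :
    (pvStepA d kv).getD n [] = d.getD n [] ++ (kv.2.filter (fun s => s == n)).map (fun _ => kv.1) := by
  unfold pvStepA
  rw [pvInner_getD, pvEnsure_getD]

theorem pvStepA_keys (kv : String × List String) (d : PySem.Dict String (List String)) :
    (pvStepA d kv).keys = PySem.Set.update d.keys (kv.1 :: kv.2) := by
  unfold pvStepA
  rw [pvInner_keys, pvEnsure_keys, PySem.Set.update_cons]

-- pass 1 of A: values
theorem pvFoldA_getD (xs : List (String × List String)) (d : PySem.Dict String (List String)) (n : String) :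
    (xs.foldl pvStepA d).getD n [] = d.getD n [] ++ pvColl xs n := by
  induction xs generalizing d with
  | nil => simp [pvColl]
  | cons kv rest ih =>
    simp only [List.foldl_cons, ih, pvStepA_getD, pvColl, List.flatMap_cons, List.append_assoc]

-- pass 1 of A: keys, in B's node-discovery order
theorem pvFoldA_keys (xs : List (String × List String)) (d : PySem.Dict String (List String)) :
    (xs.foldl pvStepA d).keys
      = xs.foldl (fun acc kv => PySem.Set.update acc (kv.1 :: kv.2)) d.keys := by
  induction xs generalizing d with
  | nil => rfl
  | cons kv rest ih => simp only [List.foldl_cons, ih, pvStepA_keys]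

theorem pvNodes_eq (xs : List (String × List String)) (acc : List String) :
    xs.foldl (fun acc kv => (kv.1 :: kv.2).foldl pvAddNode acc) acc
      = xs.foldl (fun acc kv => PySem.Set.update acc (kv.1 :: kv.2)) acc := by
  have hadd : pvAddNode = PySem.Set.add := by
    funext s x
    rw [pvAddNode, PySem.Set.add_eq_ite]
  rw [hadd]
  rfl

theorem pvNodesFold_nodup (xs : List (String × List String)) (acc : List String) (h : acc.Nodup) :
    (xs.foldl (fun acc kv => PySem.Set.update acc (kv.1 :: kv.2)) acc).Nodup := by
  induction xs generalizing acc with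
  | nil => exact h
  | cons kv rest ih => exact ih _ (PySem.Set.nodup_update _ _ h)

-- pass 2 of A: sorts each value in place, keys untouched
theorem pvSortPass_keys (l : List String) (d : PySem.Dict String (List String))
    (hsub : ∀ x ∈ l, d.contains x = true) :
    (l.foldl (fun d v => d.insert v (PySem.List.sorted (d.getD v []) (fun x => x) false)) d).keys
      = d.keys := by
  induction l generalizing d with
  | nil => rfl
  | cons v rest ih =>
    simp only [List.foldl_cons]
    rw [ih]
    · exact PySem.Dict.keys_insert_of_contains d _ (hsub v (by simp))
    · intro x hx
      simp only [PySem.Dict.contains_insert]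
      simp [hsub x (List.mem_cons_of_mem _ hx)]

theorem pvSortPass_getD (l : List String) (d : PySem.Dict String (List String)) (hl : l.Nodup) (n : String) :
    (l.foldl (fun d v => d.insert v (PySem.List.sorted (d.getD v []) (fun x => x) false)) d).getD n []
      = if n ∈ l then PySem.List.sorted (d.getD n []) (fun x => x) false else d.getD n [] := by
  induction l generalizing d with
  | nil => simp
  | cons v rest ih =>
    simp only [List.foldl_cons]
    rw [ih _ (List.Nodup.of_cons hl)]
    by_cases hn : n = v
    · subst hn
      have hnr : n ∉ rest := (List.nodup_cons.mp hl).1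
      simp [hnr, PySem.Dict.getD_insert_self]
    · rw [PySem.Dict.getD_insert_of_ne _ _ _ hn]
      simp [List.mem_cons, hn]

-- ===== VERDICT (by name: the statement is the Claim_ definition above) =====
theorem get_forward_edges_spec : Claim_equal_get_forward_edges := by
  intro xs _
  show get_forward_edges xs = get_forward_edges_alt xs
  unfold get_forward_edges get_forward_edges_alt
  set d1 := xs.foldl pvStepA PySem.Dict.empty with hd1
  have hkeys : d1.keys = xs.foldl (fun acc kv => PySem.Set.update acc (kv.1 :: kv.2)) [] := by
    rw [hd1, pvFoldA_keys, PySem.Dict.keys_empty]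
  have hnodup : d1.keys.Nodup := by
    rw [hkeys]; exact pvNodesFold_nodup xs [] List.nodup_nil
  have hget : ∀ n, d1.getD n [] = pvColl xs n := by
    intro n; rw [hd1, pvFoldA_getD, PySem.Dict.getD_empty]; rfl
  have hcont : ∀ x ∈ d1.keys, d1.contains x = true := fun x hx =>
    (PySem.Dict.contains_iff_mem_keys d1 x).mpr hx
  set d2 := d1.keys.foldl (fun d v => d.insert v (PySem.List.sorted (d.getD v []) (fun x => x) false)) d1 with hd2
  have hk2 : d2.keys = d1.keys := by rw [hd2, pvSortPass_keys _ _ hcont]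
  have hitems : d2.items = d2.keys.map (fun k => (k, d2.getD k [])) :=
    PySem.Dict.items_eq_map_keys d2 (by rw [hk2]; exact hnodup) []
  rw [hitems, hk2, pvNodes_eq, ← hkeys]
  apply List.map_congr_left
  intro n hn
  have : d2.getD n [] = PySem.List.sorted (d1.getD n []) (fun x => x) false := by
    rw [hd2, pvSortPass_getD _ _ hnodup, if_pos hn]
  rw [this, hget]
  rfl
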